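-- pv_equiv track=rewrite | github.com/carelessty/ECE6254 | src/data_utils.py | convert_to_iob2_format
-- ===== SOURCE A (Python) =====
-- from typing import Dict, List, Optional, Tuple, Union
--
-- def convert_to_iob2_format(sentences: List[List[Tuple[str, str]]]) -> List[List[Tuple[str, str]]]:
--     """
--     Ensure tags are in IOB2 format.
--
--     Args:
--         sentences: List of sentences with (token, tag) tuples
--
--     Returns:
--         List of sentences with tags converted to IOB2 format
--     """
--     iob2_sentences = []
--
--     for sentence in sentences:
--         iob2_sentence = []
--         prev_tag = "O"
--
--         for token, tag in sentence:
--             if tag != "O" and not tag.startswith("B-") and not tag.startswith("I-"):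
--                 # If tag is not in IOB format, convert it
--                 tag = f"B-{tag}"
--
--             if tag.startswith("I-") and (prev_tag == "O" or prev_tag.split("-")[1] != tag.split("-")[1]):
--                 # If I- tag doesn't follow a B- tag of the same type, convert to B-
--                 tag = f"B-{tag[2:]}"
--
--             iob2_sentence.append((token, tag))
--             prev_tag = tag
--
--         iob2_sentences.append(iob2_sentence)
--
--     return iob2_sentences
-- ===== SOURCE B (Python) =====
-- def convert_to_iob2_format(sentences):
--     """IOB2 conversion by two independent passes: normalize bare tags, then fix I- starts via adjacent pairs."""
--     result = []
--     for sentence in sentences: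
--         norm = [t if t == "O" or t.startswith("B-") or t.startswith("I-") else f"B-{t}"
--                 for _, t in sentence]
--         fixed = [f"B-{t[2:]}" if t.startswith("I-") and (p == "O" or p.split("-")[1] != t.split("-")[1]) else t
--                  for p, t in zip(["O"] + norm, norm)]
--         result.append([(tok, t) for (tok, _), t in zip(sentence, fixed)])
--     return result
-- ===== Notes on version B (the rewrite author's own statement) =====
-- stated objective: alternative
-- what changed: A's single stateful loop threading prev_tag through both rules is replaced by two independent per-sentence passes: a map that normalizes bare tags, then a zip over adjacent pairs of the normalized list (with a leading 'O') that converts I- starts to B-; this works because the I-to-B fix never changes a tag's 'O'-ness or its type segment, so the previous normalized tag carries the same information as A's processed prev_tag.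
import Mathlib
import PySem

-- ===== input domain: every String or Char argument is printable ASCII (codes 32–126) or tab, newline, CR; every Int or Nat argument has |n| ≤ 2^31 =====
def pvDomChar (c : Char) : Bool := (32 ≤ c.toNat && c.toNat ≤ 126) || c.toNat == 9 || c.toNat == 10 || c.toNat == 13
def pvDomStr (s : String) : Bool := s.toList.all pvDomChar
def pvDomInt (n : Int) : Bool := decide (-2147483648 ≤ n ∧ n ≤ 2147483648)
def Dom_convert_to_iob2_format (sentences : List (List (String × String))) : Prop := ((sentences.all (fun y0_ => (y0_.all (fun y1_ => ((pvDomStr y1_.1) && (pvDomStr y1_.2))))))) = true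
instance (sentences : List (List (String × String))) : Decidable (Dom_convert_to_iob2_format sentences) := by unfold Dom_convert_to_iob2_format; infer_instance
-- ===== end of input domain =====

-- B replaces A's stateful single loop by two independent passes per sentence (normalize bare tags,
-- then fix I- starts by looking at the previous normalized tag); same results, alternative decomposition.

-- ===== PORT A =====
-- literal transliteration of A: one fold over sentences, inner fold carrying (built sentence, prev_tag).
-- the `.getD ""` after `[1]` is never used: `prev_tag.split("-")[1]` is only evaluated when prev_tag ≠ "O",
-- and every stored prev_tag other than "O" starts with "B-" or "I-", so the split always has a second part.
def convert_to_iob2_format (sentences : List (List (String × String))) : List (List (String × String)) :=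
  sentences.foldl (fun iob2_sentences sentence =>
    let r := sentence.foldl (fun (st : List (String × String) × String) tt =>
      let token := tt.1
      let tag := tt.2
      let tag := if tag != "O" && !(PySem.Str.startswith tag "B-") && !(PySem.Str.startswith tag "I-")
                 then "B-" ++ tag else tag
      let tag := if PySem.Str.startswith tag "I-" &&
                   (st.2 == "O" ||
                    (PySem.List.pyGet? ((PySem.Str.split? st.2 "-").getD []) 1).getD "" !=
                    (PySem.List.pyGet? ((PySem.Str.split? tag "-").getD []) 1).getD "")
                 then "B-" ++ PySem.Str.slice tag (some 2) none else tag
      (st.1 ++ [(token, tag)], tag)) ([], "O")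
    iob2_sentences ++ [r.1]) []

-- ===== PORT B =====
-- s.split("-")[1] (the `.getD ""` defaults are unreachable where B evaluates this)
def pvSplit1 (s : String) : String :=
  (PySem.List.pyGet? ((PySem.Str.split? s "-").getD []) 1).getD ""

def pvNormalize (t : String) : String :=
  if t == "O" || PySem.Str.startswith t "B-" || PySem.Str.startswith t "I-" then t else "B-" ++ t

def pvFixPair (p t : String) : String :=
  if PySem.Str.startswith t "I-" && (p == "O" || pvSplit1 p != pvSplit1 t)
  then "B-" ++ PySem.Str.slice t (some 2) none else t

def convert_to_iob2_format_alt (sentences : List (List (String × String))) : List (List (String × String)) :=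
  sentences.map (fun sentence =>
    let norm := sentence.map (fun tt => pvNormalize tt.2)
    let fixed := List.zipWith pvFixPair ("O" :: norm) norm
    List.zipWith (fun tt t => (tt.1, t)) sentence fixed)

-- ===== PRECONDITION & SPEC =====
def Spec_convert_to_iob2_format (sentences : List (List (String × String))) (out : List (List (String × String))) : Prop := out = convert_to_iob2_format_alt sentences
instance (sentences : List (List (String × String))) (out : List (List (String × String))) : Decidable (Spec_convert_to_iob2_format sentences out) := by unfold Spec_convert_to_iob2_format; infer_instance

-- ===== CLAIM =====
def Claim_equal_convert_to_iob2_format : Prop := ∀ (sentences : List (List (String × String))), Dom_convert_to_iob2_format sentences → Spec_convert_to_iob2_format sentences (convert_to_iob2_format sentences)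

-- ===== LEMMAS AND PROOFS =====

-- A's prev_tag and B's previous normalized tag agree on everything the fix-up condition reads.
def pvRel (p q : String) : Prop := (p = "O" ↔ q = "O") ∧ pvSplit1 p = pvSplit1 q

theorem pv_condEq (p q t : String) (h : pvRel p q) : pvFixPair p t = pvFixPair q t := by
  obtain ⟨h1, h2⟩ := h
  unfold pvFixPair
  have : (p == "O") = (q == "O") := by
    by_cases hp : p = "O"
    · simp [hp, h1.mp hp]
    · have hq : ¬ q = "O" := fun hq => hp (h1.mpr hq)
      simp [hp, hq]
  rw [this, h2]

theorem pv_go_acc (sep : List Char) (fuel : Nat) : ∀ (l cur : List Char) (acc : List (List Char)),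
    PySem.Chars.splitOn.go sep fuel l cur acc = acc.reverse ++ PySem.Chars.splitOn.go sep fuel l cur [] := by
  induction fuel with
  | zero => intro l cur acc; simp [PySem.Chars.splitOn.go]
  | succ n ih =>
    intro l cur acc
    cases l with
    | nil => simp [PySem.Chars.splitOn.go]
    | cons c rest =>
      simp only [PySem.Chars.splitOn.go]
      by_cases hp : sep.isPrefixOf (c :: rest) = true
      · simp only [hp, if_pos]
        rw [ih _ _ (cur.reverse :: acc), ih _ _ ([cur.reverse])]
        simp
      · simp only [hp, if_false, Bool.false_eq_true]
        exact ih _ _ acc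

theorem pv_splitOn_cons2 (c : Char) (hc : c ≠ '-') (r : List Char) :
    PySem.Chars.splitOn (c :: '-' :: r) ['-'] = [c] :: PySem.Chars.splitOn r ['-'] := by
  have hlen : (c :: '-' :: r).length + 1 = (r.length + 2) + 1 := by simp
  unfold PySem.Chars.splitOn
  rw [hlen]
  have h1 : ¬ (['-'].isPrefixOf (c :: '-' :: r) = true) := by
    simp [List.isPrefixOf, hc.symm]
  rw [PySem.Chars.splitOn.go]
  rw [if_neg h1]
  rw [PySem.Chars.splitOn.go]
  have h2 : ['-'].isPrefixOf ('-' :: r) = true := by simp [List.isPrefixOf]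
  rw [if_pos h2]
  simp only [List.length_cons, List.length_nil, List.drop_succ_cons, List.drop_zero,
    List.reverse_cons, List.reverse_nil, List.nil_append]
  rw [pv_go_acc]
  rfl

theorem pv_split1_cons (c c' : Char) (hc : c ≠ '-') (hc' : c' ≠ '-') (r : List Char)
    (s t : String) (hs : s.toList = c :: '-' :: r) (ht : t.toList = c' :: '-' :: r) :
    pvSplit1 s = pvSplit1 t := by
  unfold pvSplit1
  rw [show PySem.Str.split? s "-" = (PySem.Chars.split? s.toList ['-']).map (List.map String.ofList) from rfl,
      show PySem.Str.split? t "-" = (PySem.Chars.split? t.toList ['-']).map (List.map String.ofList) from rfl,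
      hs, ht]
  simp only [PySem.Chars.split?, List.isEmpty_cons, pv_splitOn_cons2 c hc, pv_splitOn_cons2 c' hc']
  simp only [PySem.List.pyGet?, PySem.List.pyIdx?]
  by_cases hl : 0 < (PySem.Chars.splitOn r ['-']).length <;> simp [hl]

theorem pv_relPreserve (p t : String) : pvRel (pvFixPair p t) t := by
  unfold pvFixPair
  split_ifs with h
  · have hI : PySem.Str.startswith t "I-" = true := (Bool.and_eq_true_iff.mp h).1
    rw [PySem.Str.startswith_eq] at hI
    obtain ⟨r, hr⟩ := (PySem.Chars.startswith_iff _ _).mp hI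
    have ht : t.toList = 'I' :: '-' :: r := by rw [← hr]; rfl
    have htl : ("B-" ++ PySem.Str.slice t (some 2) none).toList = 'B' :: '-' :: r := by
      rw [String.toList_append, PySem.Str.toList_slice]
      rw [show PySem.Chars.slice t.toList (some 2) none = t.toList.drop (2:Int).toNat from
        PySem.List.slice_from t.toList (by norm_num)]
      rw [ht]; rfl
    refine ⟨?_, ?_⟩
    · constructor
      · intro hO
        have := congrArg String.toList hO
        rw [htl] at this; simp at this
      · intro hO
        rw [hO] at ht; simp at ht
    · exact pv_split1_cons 'B' 'I' (by decide) (by decide) r _ t htl ht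
  · exact ⟨Iff.rfl, rfl⟩

-- A's inner step equals pvFixPair ∘ pvNormalize.
theorem pv_stepA (st : List (String × String) × String) (tt : String × String) :
    (let token := tt.1
     let tag := tt.2
     let tag := if tag != "O" && !(PySem.Str.startswith tag "B-") && !(PySem.Str.startswith tag "I-")
                then "B-" ++ tag else tag
     let tag := if PySem.Str.startswith tag "I-" &&
                  (st.2 == "O" ||
                   (PySem.List.pyGet? ((PySem.Str.split? st.2 "-").getD []) 1).getD "" !=
                   (PySem.List.pyGet? ((PySem.Str.split? tag "-").getD []) 1).getD "")
                then "B-" ++ PySem.Str.slice tag (some 2) none else tag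
     ((st.1 ++ [(token, tag)], tag) : List (String × String) × String)) =
    (st.1 ++ [(tt.1, pvFixPair st.2 (pvNormalize tt.2))], pvFixPair st.2 (pvNormalize tt.2)) := by
  have hnorm : (if tt.2 != "O" && !(PySem.Str.startswith tt.2 "B-") && !(PySem.Str.startswith tt.2 "I-")
                then "B-" ++ tt.2 else tt.2) = pvNormalize tt.2 := by
    unfold pvNormalize
    cases h2 : PySem.Str.startswith tt.2 "B-" <;> cases h3 : PySem.Str.startswith tt.2 "I-" <;>
      by_cases h1 : tt.2 = "O" <;> simp [h1]
  simp only [hnorm, pvFixPair, pvSplit1]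
  rfl

theorem pv_inner (sentence : List (String × String)) :
    ∀ (acc : List (String × String)) (p q : String), pvRel p q →
    (sentence.foldl (fun (st : List (String × String) × String) tt =>
      let token := tt.1
      let tag := tt.2
      let tag := if tag != "O" && !(PySem.Str.startswith tag "B-") && !(PySem.Str.startswith tag "I-")
                 then "B-" ++ tag else tag
      let tag := if PySem.Str.startswith tag "I-" &&
                   (st.2 == "O" ||
                    (PySem.List.pyGet? ((PySem.Str.split? st.2 "-").getD []) 1).getD "" !=
                    (PySem.List.pyGet? ((PySem.Str.split? tag "-").getD []) 1).getD "")
                 then "B-" ++ PySem.Str.slice tag (some 2) none else tag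
      (st.1 ++ [(token, tag)], tag)) (acc, p)).1 =
    acc ++ List.zipWith (fun tt t => (tt.1, t)) sentence
      (List.zipWith pvFixPair (q :: sentence.map (fun tt => pvNormalize tt.2))
        (sentence.map (fun tt => pvNormalize tt.2))) := by
  induction sentence with
  | nil => intro acc p q _; simp
  | cons tt rest ih =>
    intro acc p q h
    rw [List.foldl_cons, pv_stepA]
    rw [ih _ _ (pvNormalize tt.2) (pv_relPreserve p (pvNormalize tt.2))]
    simp only [List.map_cons, List.zipWith_cons_cons, List.append_assoc, List.singleton_append]
    rw [pv_condEq p q (pvNormalize tt.2) h]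

-- ===== VERDICT =====
theorem convert_to_iob2_format_spec : Claim_equal_convert_to_iob2_format := by
  intro sentences _
  unfold Spec_convert_to_iob2_format convert_to_iob2_format convert_to_iob2_format_alt
  rw [PySem.List.foldl_append_singleton_eq_map]
  refine List.map_congr_left (fun sentence _ => ?_)
  simpa using pv_inner sentence [] "O" "O" ⟨Iff.rfl, rfl⟩
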